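-- pv_equiv track=rewrite | github.com/rameshrvr/HackerRank | Algorithms/DynamicProgramming/sherlock_and_cost.py | calc_max_cost
-- ===== SOURCE A (Python) =====
-- def calc_max_cost(array, size):
--     t1 = 0
--     t2 = 0
--     for index in range(size - 1):
--         diff1 = abs(array[index + 1] - 1)
--         diff2 = abs(1 - array[index])
--         temp = t1
--         t1 = t2 + diff1
--         t2 = temp + diff2
--
--     return max(t1, t2)
-- ===== SOURCE B (Python) =====
-- def calc_max_cost(array, size):
--     # Closed-form unrolling of the swapping DP: the contribution added at step
--     # index lands in the final t1 iff (n-1-index) is even (one swap per later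
--     # step), so each final accumulator is a single parity-selected sum.
--     n = size - 1
--     t1 = sum(abs(array[i + 1] - 1) if (n - 1 - i) % 2 == 0 else abs(1 - array[i])
--              for i in range(n))
--     t2 = sum(abs(1 - array[i]) if (n - 1 - i) % 2 == 0 else abs(array[i + 1] - 1)
--              for i in range(n))
--     return max(t1, t2)
-- ===== Notes on version B (the rewrite author's own statement) =====
-- stated objective: alternative
-- what changed: Unrolls the two swapping DP accumulators into a closed form: each final accumulator is a parity-selected sum over the indices (the term added at step i ends in t1 iff n-1-i is even), computed as two independent sums instead of simulating the paired state.
import Mathlib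
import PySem

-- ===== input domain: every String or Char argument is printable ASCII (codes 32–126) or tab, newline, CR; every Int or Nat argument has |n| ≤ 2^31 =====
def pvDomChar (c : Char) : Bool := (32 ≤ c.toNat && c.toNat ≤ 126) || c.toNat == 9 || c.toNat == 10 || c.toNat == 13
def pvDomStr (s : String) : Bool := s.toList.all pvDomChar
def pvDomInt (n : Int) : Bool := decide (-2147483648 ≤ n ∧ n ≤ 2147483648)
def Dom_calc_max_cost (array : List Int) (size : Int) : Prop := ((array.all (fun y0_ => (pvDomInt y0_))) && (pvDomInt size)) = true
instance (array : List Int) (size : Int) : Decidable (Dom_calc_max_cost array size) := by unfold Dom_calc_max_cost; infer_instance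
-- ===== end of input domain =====

-- ===== PORT A =====
-- A: Sherlock-and-Cost DP with two swapping accumulators t1, t2.
def calc_max_cost (array : List Int) (size : Int) : Int :=
  let st := (PySem.List.pyRange 0 (size - 1) 1).foldl
    (fun (p : Int × Int) index =>
      let diff1 := |PySem.List.pyGetD array (index + 1) 0 - 1|
      let diff2 := |1 - PySem.List.pyGetD array index 0|
      (p.2 + diff1, p.1 + diff2)) (0, 0)
  max st.1 st.2

-- ===== PORT B =====
-- B: closed-form unrolling — each final accumulator is a parity-selected sum.
def calc_max_cost_alt (array : List Int) (size : Int) : Int :=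
  let n := size - 1
  let t1 := ((PySem.List.pyRange 0 n 1).map (fun i =>
      if PySem.Int.mod (n - 1 - i) 2 == 0
      then |PySem.List.pyGetD array (i + 1) 0 - 1|
      else |1 - PySem.List.pyGetD array i 0|)).sum
  let t2 := ((PySem.List.pyRange 0 n 1).map (fun i =>
      if PySem.Int.mod (n - 1 - i) 2 == 0
      then |1 - PySem.List.pyGetD array i 0|
      else |PySem.List.pyGetD array (i + 1) 0 - 1|)).sum
  max t1 t2

-- ===== PRECONDITION & SPEC =====
-- Pre_ excludes exactly the inputs where Python A raises IndexError (size exceeding the list length).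
def Pre_calc_max_cost (array : List Int) (size : Int) : Prop := size ≤ (array.length : Int) ∨ size ≤ 1
instance (array : List Int) (size : Int) : Decidable (Pre_calc_max_cost array size) := by unfold Pre_calc_max_cost; infer_instance
def pvWitness_calc_max_cost : List Int × Int := ([3, 2, 4, 1], 4)
def Spec_calc_max_cost (array : List Int) (size : Int) (out : Int) : Prop := out = calc_max_cost_alt array size
instance (array : List Int) (size : Int) (out : Int) : Decidable (Spec_calc_max_cost array size out) := by unfold Spec_calc_max_cost; infer_instance

-- ===== CLAIM (what is proved, stated in full; the proofs are below) =====
def Claim_equal_calc_max_cost : Prop := ∀ (array : List Int) (size : Int), Dom_calc_max_cost array size → Pre_calc_max_cost array size → Spec_calc_max_cost array size (calc_max_cost array size)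

-- ===== LEMMAS AND PROOFS =====

-- Unrolling the swapping fold: over range a..n, the fold from (t1,t2) equals the
-- two parity-selected sums, with the initial pair routed by the parity of n-a.
lemma pv_unroll (f g : Int → Int) (n : Int) :
    ∀ (k : ℕ) (a t1 t2 : Int), (n - a).toNat = k →
    (PySem.List.pyRange a n 1).foldl (fun (p : Int × Int) i => (p.2 + f i, p.1 + g i)) (t1, t2)
    = ( ((PySem.List.pyRange a n 1).map (fun i =>
          if PySem.Int.mod (n - 1 - i) 2 == 0 then f i else g i)).sum
          + (if k % 2 = 0 then t1 else t2),
        ((PySem.List.pyRange a n 1).map (fun i =>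
          if PySem.Int.mod (n - 1 - i) 2 == 0 then g i else f i)).sum
          + (if k % 2 = 0 then t2 else t1) ) := by
  intro k
  induction k with
  | zero =>
    intro a t1 t2 hk
    have h : n ≤ a := by omega
    simp [PySem.List.pyRange_one_eq_nil h]
  | succ m ih =>
    intro a t1 t2 hk
    have ha : a < n := by omega
    have hm : (n - (a + 1)).toNat = m := by omega
    have hna : n - 1 - a = (m : Int) := by omega
    rw [PySem.List.pyRange_one_cons ha]
    simp only [List.foldl_cons, List.map_cons, List.sum_cons]
    rw [ih (a + 1) (t2 + f a) (t1 + g a) hm]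
    have hmod : (PySem.Int.mod (n - 1 - a) 2 == 0) = true ↔ m % 2 = 0 := by
      rw [hna, PySem.Int.mod_eq_emod_of_pos (by norm_num)]
      simp only [beq_iff_eq]
      omega
    by_cases h0 : m % 2 = 0
    · have h1 : (m + 1) % 2 ≠ 0 := by omega
      refine Prod.ext ?_ ?_ <;> simp [h0, h1] <;>
        (rw [if_pos (show (2:Int) ∣ n - 1 - a by omega)]; ring)
    · have h1 : (m + 1) % 2 = 0 := by omega
      refine Prod.ext ?_ ?_ <;> simp [h0, h1] <;>
        (rw [if_neg (show ¬ (2:Int) ∣ n - 1 - a by omega)]; ring)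

-- ===== VERDICT (by name: the statement is the Claim_ definition above) =====
theorem calc_max_cost_spec : Claim_equal_calc_max_cost := by
  intro array size _ _
  unfold Spec_calc_max_cost calc_max_cost calc_max_cost_alt
  rw [pv_unroll (fun i => |PySem.List.pyGetD array (i + 1) 0 - 1|)
        (fun i => |1 - PySem.List.pyGetD array i 0|) (size - 1)
        ((size - 1 - 0).toNat) 0 0 0 rfl]
  simp
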